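-- pv_equiv track=rewrite | github.com/animeshokhade/dsa | geeks4geeks/#160.py | convertFive
-- ===== SOURCE A (Python) =====
-- def convertFive(n):
--     # Code here
--     tmp = n
--     ret = 0
--     fiv = 5
--     base = 1
--
--     while tmp:
--         mod = tmp % 10
--
--         if mod != 0:
--             ret += mod * base
--         else:
--             ret += fiv
--
--         base *= 10
--         fiv *= 10
--         tmp //= 10
--
--     return ret
-- ===== SOURCE B (Python) =====
-- def convertFive(n):
--     # Top-down recursion via divmod: most-significant digits first, value composed on return.
--     if n < 10:
--         return 5 if n == 0 else n
--     q, r = divmod(n, 10)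
--     return convertFive(q) * 10 + (r or 5)
-- ===== Notes on version B (the rewrite author's own statement) =====
-- stated objective: alternative
-- what changed: Replaces A's bottom-up while-loop that maintains base/fiv power-of-ten accumulators with a direct top-down divmod recursion that composes the result on return (no multiplier state).
-- intended difference: On n = 0 A's loop never runs and returns 0, while B returns 5, the intended value since the single digit 0 of the number 0 should be replaced by 5. — e.g. on convertFive(0): A returns 0, B returns 5
import Mathlib
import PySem

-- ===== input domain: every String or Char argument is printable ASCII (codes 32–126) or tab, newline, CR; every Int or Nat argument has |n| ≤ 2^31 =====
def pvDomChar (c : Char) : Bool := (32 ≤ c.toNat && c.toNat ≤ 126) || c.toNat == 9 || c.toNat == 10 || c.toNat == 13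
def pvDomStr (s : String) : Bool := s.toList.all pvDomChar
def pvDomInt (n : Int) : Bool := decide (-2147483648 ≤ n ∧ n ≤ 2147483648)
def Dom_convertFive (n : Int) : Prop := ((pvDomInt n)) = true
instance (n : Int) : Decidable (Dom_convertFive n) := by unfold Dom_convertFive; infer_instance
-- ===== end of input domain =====

-- B replaces A's bottom-up accumulator while-loop with a top-down divmod recursion (alternative, same cost);
-- on n = 0, A returns 0 while B returns the intended 5 (see D_convertFive).


-- ===== PORT A =====
-- Python's `while tmp` loop; the guard `0 < tmp` (instead of `tmp ≠ 0`) only totalises the port: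
-- for tmp < 0 the Python loop never terminates, and Pre_ excludes those inputs.
def convertFiveLoop (tmp ret fiv base : Int) : Int :=
  if h : 0 < tmp then
    let m := PySem.Int.mod tmp 10
    convertFiveLoop (PySem.Int.floordiv tmp 10)
      (if m ≠ 0 then ret + m * base else ret + fiv) (fiv * 10) (base * 10)
  else ret
termination_by tmp.toNat
decreasing_by
  rw [PySem.Int.floordiv_eq_ediv_of_pos (by omega : (0:Int) < 10)]
  omega

def convertFive (n : Int) : Int := convertFiveLoop n 0 5 1

-- ===== PORT B =====
def convertFive_alt (n : Int) : Int :=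
  if h : n < 10 then (if n = 0 then 5 else n)
  else
    let r := PySem.Int.mod n 10
    convertFive_alt (PySem.Int.floordiv n 10) * 10 + (if r ≠ 0 then r else 5)
termination_by n.toNat
decreasing_by
  rw [PySem.Int.floordiv_eq_ediv_of_pos (by omega : (0:Int) < 10)]
  omega

-- ===== PRECONDITION & SPEC =====
-- Pre_ excludes n < 0: there Python A's `while tmp` loop never terminates (tmp //= 10 stalls at -1).
def Pre_convertFive (n : Int) : Prop := 0 ≤ n
instance (n : Int) : Decidable (Pre_convertFive n) := by unfold Pre_convertFive; infer_instance
def pvWitness_convertFive : Int := (105)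

-- On n = 0 A's loop body never runs and A returns 0, while B returns 5, the intended value:
-- the single digit 0 of the number 0 should be replaced by 5.
def D_convertFive (n : Int) : Prop := n = 0
instance (n : Int) : Decidable (D_convertFive n) := by unfold D_convertFive; infer_instance

def Spec_convertFive (n : Int) (out : Int) : Prop := ¬ D_convertFive n → out = convertFive_alt n
instance (n : Int) (out : Int) : Decidable (Spec_convertFive n out) := by unfold Spec_convertFive; infer_instance

def pvDiffWitness_convertFive : Int := (0)
def pvDiffWitnessOut_convertFive : Int × Int := (0, 5)

-- ===== CLAIM (what is proved, stated in full; the proofs are below) =====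
def Claim_unchanged_convertFive : Prop := ∀ (n : Int), Dom_convertFive n → Pre_convertFive n → Spec_convertFive n (convertFive n)
def Claim_changed_convertFive : Prop := Dom_convertFive (pvDiffWitness_convertFive) ∧ Pre_convertFive (pvDiffWitness_convertFive) ∧ D_convertFive (pvDiffWitness_convertFive) ∧ convertFive (pvDiffWitness_convertFive) = pvDiffWitnessOut_convertFive.1 ∧ convertFive_alt (pvDiffWitness_convertFive) = pvDiffWitnessOut_convertFive.2 ∧ pvDiffWitnessOut_convertFive.1 ≠ pvDiffWitnessOut_convertFive.2
def Claim_exact_convertFive : Prop := ∀ (n : Int), Dom_convertFive n → Pre_convertFive n → D_convertFive n → convertFive n ≠ convertFive_alt n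

-- ===== LEMMAS AND PROOFS =====

-- Loop invariant: for positive tmp, the loop adds base * (B's value of tmp) to ret,
-- provided fiv carries 5 * base.
theorem convertFiveLoop_eq (k : Nat) :
    ∀ tmp ret base : Int, tmp.toNat ≤ k → 0 < tmp →
      convertFiveLoop tmp ret (5 * base) base = ret + base * convertFive_alt tmp := by
  induction k with
  | zero => intro tmp _ _ hle hpos; omega
  | succ k ih =>
    intro tmp ret base hle hpos
    rw [convertFiveLoop]
    simp only [hpos, dif_pos]
    have h10 : (0:Int) < 10 := by omega
    rw [PySem.Int.floordiv_eq_ediv_of_pos h10, PySem.Int.mod_eq_emod_of_pos h10]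
    by_cases hq : tmp / 10 = 0
    · -- last digit: tmp < 10, recursive call has tmp' = 0 and returns ret'
      have htmp : tmp < 10 := by omega
      have hm : tmp % 10 = tmp := by omega
      rw [convertFiveLoop]
      simp only [hq, lt_irrefl, dif_neg, not_false_iff]
      rw [convertFive_alt]
      simp only [htmp, dif_pos]
      have hne : tmp ≠ 0 := by omega
      simp [hm, hne]
      ring
    · -- more digits: apply IH to the quotient
      have hqpos : 0 < tmp / 10 := by omega
      have hqle : (tmp / 10).toNat ≤ k := by omega
      have h5 : 5 * base * 10 = 5 * (base * 10) := by ring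
      rw [h5, ih (tmp / 10) _ (base * 10) hqle hqpos]
      have hge : ¬ tmp < 10 := by omega
      have hB : convertFive_alt tmp
          = convertFive_alt (tmp / 10) * 10 + (if tmp % 10 ≠ 0 then tmp % 10 else 5) := by
        rw [convertFive_alt, dif_neg hge]
        simp only [PySem.Int.floordiv_eq_ediv_of_pos h10, PySem.Int.mod_eq_emod_of_pos h10]
      rw [hB]
      by_cases hm : tmp % 10 = 0 <;> simp [hm] <;> ring

-- ===== VERDICT (by name: the statement is the Claim_ definition above) =====
theorem convertFive_spec : Claim_unchanged_convertFive := by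
  intro n _ hpre hD
  have hpos : 0 < n := by
    rcases lt_or_eq_of_le hpre with h | h
    · exact h
    · exact absurd h.symm hD
  unfold Spec_convertFive at *
  show convertFive n = convertFive_alt n
  unfold convertFive
  have := convertFiveLoop_eq n.toNat n 0 1 (le_refl _) hpos
  simpa using this

theorem convertFive_A_zero : convertFive 0 = 0 := by
  unfold convertFive; rw [convertFiveLoop]; norm_num

theorem convertFive_B_zero : convertFive_alt 0 = 5 := by
  rw [convertFive_alt]; norm_num

theorem convertFive_changed : Claim_changed_convertFive := by
  unfold Claim_changed_convertFive
  refine ⟨by decide, by decide, by decide, convertFive_A_zero, convertFive_B_zero, by decide⟩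

theorem convertFive_tight : Claim_exact_convertFive := by
  intro n _ _ hD
  subst hD
  rw [convertFive_A_zero, convertFive_B_zero]
  decide
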